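-- pv_equiv track=rewrite | github.com/cairdcoinheringaahing/Deorst | custom_types.py | __count_lens
-- ===== SOURCE A (Python) =====
-- def __count_lens(length, y):
--     lens = [0]*y
--     i = 0
--     l = length
--     while l:
--         lens[i] += 1
--         i += 1
--         i %= len(lens)
--         l -= 1
--     return lens
-- ===== SOURCE B (Python) =====
-- def __count_lens(length, y):
--     if length == 0:
--         return [0] * y
--     q, r = divmod(length, y)
--     return [q + 1] * r + [q] * (y - r)
-- ===== Notes on version B (the rewrite author's own statement) =====
-- stated objective: faster
-- what changed: Replaces the element-by-element round-robin while loop over all `length` units with the closed form length = q*y + r: the first r buckets get q+1 and the rest get q, built with list repetition.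
import Mathlib
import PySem

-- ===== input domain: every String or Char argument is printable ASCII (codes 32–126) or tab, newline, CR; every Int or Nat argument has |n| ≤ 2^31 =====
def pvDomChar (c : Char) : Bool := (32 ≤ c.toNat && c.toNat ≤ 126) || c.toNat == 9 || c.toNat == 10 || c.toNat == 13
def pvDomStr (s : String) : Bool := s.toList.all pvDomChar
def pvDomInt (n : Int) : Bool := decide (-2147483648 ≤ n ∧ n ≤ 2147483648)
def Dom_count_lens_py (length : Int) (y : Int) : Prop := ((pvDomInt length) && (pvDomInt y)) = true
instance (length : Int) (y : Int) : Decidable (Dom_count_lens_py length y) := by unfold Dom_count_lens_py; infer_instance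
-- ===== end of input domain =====

-- B replaces A's O(length) one-unit-at-a-time round-robin loop with the closed form
-- length = q*y + r (first r buckets get q+1, the rest q), O(y).

-- ===== PORT A =====
-- the while loop: one step does lens[i] += 1; i = (i+1) % len(lens); l -= 1; fuel = initial l
def count_lens_go (lens : List Int) (i : Nat) : Nat → List Int
  | 0 => lens
  | n + 1 => count_lens_go (lens.set i (lens.getD i 0 + 1)) ((i + 1) % lens.length) n

def count_lens_py (length : Int) (y : Int) : List Int :=
  count_lens_go (List.replicate y.toNat 0) 0 length.toNat

-- ===== PORT B =====
def count_lens_py_alt (length : Int) (y : Int) : List Int :=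
  if length = 0 then List.replicate y.toNat 0
  else
    let q := PySem.Int.floordiv length y
    let r := PySem.Int.mod length y
    List.replicate r.toNat (q + 1) ++ List.replicate (y - r).toNat q

-- ===== PRECONDITION & SPEC =====
-- Pre_ excludes exactly the inputs where Python A does not return: length < 0 (the while
-- loop never terminates) and length > 0 with y ≤ 0 (lens is empty, lens[i] += 1 raises IndexError).
def Pre_count_lens_py (length : Int) (y : Int) : Prop :=
  0 ≤ length ∧ (length = 0 ∨ 0 < y)
instance (length : Int) (y : Int) : Decidable (Pre_count_lens_py length y) := by
  unfold Pre_count_lens_py; infer_instance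

def pvWitness_count_lens_py : Int × Int := (7, 3)

def Spec_count_lens_py (length : Int) (y : Int) (out : List Int) : Prop := out = count_lens_py_alt length y
instance (length : Int) (y : Int) (out : List Int) : Decidable (Spec_count_lens_py length y out) := by
  unfold Spec_count_lens_py; infer_instance

-- ===== CLAIM (what is proved, stated in full; the proofs are below) =====
def Claim_equal_count_lens_py : Prop := ∀ (length : Int) (y : Int), Dom_count_lens_py length y → Pre_count_lens_py length y → Spec_count_lens_py length y (count_lens_py length y)

-- ===== LEMMAS AND PROOFS =====

-- number of loop steps (out of n, pointer starting at i, y buckets) that land on bucket j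
def hitc (y : Nat) : Nat → Nat → Nat → Nat
  | 0, _, _ => 0
  | n + 1, i, j => (if j = i then 1 else 0) + hitc y n ((i + 1) % y) j

lemma hitc_snoc (y : Nat) (hy : 0 < y) :
    ∀ (n i j : Nat), i < y →
      hitc y (n + 1) i j = hitc y n i j + (if (i + n) % y = j then 1 else 0) := by
  intro n
  induction n with
  | zero =>
    intro i j hi
    simp [hitc, Nat.mod_eq_of_lt hi, eq_comm]
  | succ n ih =>
    intro i j hi
    have hi' : (i + 1) % y < y := Nat.mod_lt _ hy
    show (if j = i then 1 else 0) + hitc y (n + 1) ((i + 1) % y) j = _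
    rw [ih ((i + 1) % y) j hi']
    have hmod : ((i + 1) % y + n) % y = (i + (n + 1)) % y := by
      rw [Nat.mod_add_mod]; congr 1; omega
    rw [hmod]
    simp [hitc]
    omega

lemma hitc_closed (y : Nat) (hy : 0 < y) (j : Nat) (hj : j < y) :
    ∀ n, hitc y n 0 j = n / y + (if j < n % y then 1 else 0) := by
  intro n
  induction n with
  | zero => simp [hitc]
  | succ n ih =>
    rw [hitc_snoc y hy n 0 j hy, ih]
    have hkey : (n % y + 1) % y = (n + 1) % y := Nat.mod_add_mod n y 1
    have hrlt : n % y < y := Nat.mod_lt n hy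
    by_cases hc : n % y + 1 = y
    · -- n % y = y - 1 : the round completes
      have hmod : (n + 1) % y = 0 := by rw [← hkey, hc, Nat.mod_self]
      have hdvd : y ∣ n + 1 := Nat.dvd_of_mod_eq_zero hmod
      rw [Nat.succ_div, if_pos hdvd, hmod]
      simp only [Nat.zero_add]
      split_ifs <;> omega
    · -- n % y + 1 < y
      have hmod : (n + 1) % y = n % y + 1 := by
        rw [← hkey, Nat.mod_eq_of_lt (by omega)]
      have hndvd : ¬ y ∣ n + 1 := by
        intro h
        have := Nat.mod_eq_zero_of_dvd h
        omega
      rw [Nat.succ_div, if_neg hndvd, hmod]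
      simp only [Nat.zero_add]
      split_ifs <;> omega

lemma go_eq (n : Nat) : ∀ (lens : List Int) (i : Nat), i < lens.length →
    count_lens_go lens i n =
      (List.range lens.length).map (fun j => lens.getD j 0 + (hitc lens.length n i j : Int)) := by
  induction n with
  | zero =>
    intro lens i _
    simp only [count_lens_go, hitc, Nat.cast_zero, add_zero]
    apply List.ext_getElem
    · simp
    · intro k h1 h2
      simp [List.getD_eq_getElem?_getD, List.getElem?_eq_getElem h1]
  | succ n ih =>
    intro lens i hi
    have hy : 0 < lens.length := Nat.lt_of_le_of_lt (Nat.zero_le i) hi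
    show count_lens_go (lens.set i (lens.getD i 0 + 1)) ((i + 1) % lens.length) n = _
    have hlen : (lens.set i (lens.getD i 0 + 1)).length = lens.length := by simp
    have hi' : (i + 1) % lens.length < (lens.set i (lens.getD i 0 + 1)).length := by
      rw [hlen]; exact Nat.mod_lt _ hy
    rw [ih _ _ hi']
    rw [hlen]
    apply List.map_congr_left
    intro j hj
    rw [List.mem_range] at hj
    have hgetD : (lens.set i (lens.getD i 0 + 1)).getD j 0 =
        if j = i then lens.getD i 0 + 1 else lens.getD j 0 := by
      by_cases h : j = i
      · subst h
        simp [List.getD_eq_getElem?_getD, hj]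
      · simp [List.getD_eq_getElem?_getD, List.getElem?_set_ne (fun he => h he.symm)]
        exact fun he => absurd he h
    rw [hgetD]
    show _ = lens.getD j 0 + ((hitc lens.length (n + 1) i j : Nat) : Int)
    have hstep : hitc lens.length (n + 1) i j = (if j = i then 1 else 0) + hitc lens.length n ((i + 1) % lens.length) j := rfl
    rw [hstep]
    split_ifs with h
    · subst h; push_cast; ring
    · push_cast; ring

lemma range_map_ite (a b : Nat) (x z : Int) :
    (List.range (a + b)).map (fun j => if j < a then x else z) =
      List.replicate a x ++ List.replicate b z := by
  apply List.ext_getElem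
  · simp
  · intro k h1 h2
    simp only [List.getElem_map, List.getElem_range]
    by_cases hk : k < a
    · rw [if_pos hk, List.getElem_append_left (by simpa using hk)]
      simp
    · rw [if_neg hk, List.getElem_append_right (by simpa using hk)]
      simp

-- ===== VERDICT (by name: the statement is the Claim_ definition above) =====
theorem count_lens_py_spec : Claim_equal_count_lens_py := by
  intro length y _ hpre
  obtain ⟨hl, hcase⟩ := hpre
  unfold Spec_count_lens_py count_lens_py count_lens_py_alt
  rcases eq_or_ne length 0 with h0 | h0
  · subst h0
    simp [count_lens_go]
  · have hy : 0 < y := hcase.resolve_left h0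
    rw [if_neg h0]
    set N := length.toNat with hN
    set Y := y.toNat with hY
    have hYpos : 0 < Y := by omega
    have hcastl : length = (N : Int) := by omega
    have hcasty : y = (Y : Int) := by omega
    have hq : PySem.Int.floordiv length y = ((N / Y : Nat) : Int) := by
      rw [hcastl, hcasty, PySem.Int.floordiv_natCast]
    have hr : PySem.Int.mod length y = ((N % Y : Nat) : Int) := by
      rw [hcastl, hcasty, PySem.Int.mod_natCast]
    simp only [hq, hr]
    have hrlt : N % Y < Y := Nat.mod_lt _ hYpos
    have hgo := go_eq N (List.replicate Y (0 : Int)) 0 (by simpa using hYpos)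
    rw [List.length_replicate] at hgo
    rw [hgo]
    have hmap : (List.range Y).map (fun j => (List.replicate Y (0:Int)).getD j 0 + (hitc Y N 0 j : Int)) =
        (List.range Y).map (fun j => if j < N % Y then ((N / Y : Nat) : Int) + 1 else ((N / Y : Nat) : Int)) := by
      apply List.map_congr_left
      intro j hj
      rw [List.mem_range] at hj
      rw [hitc_closed Y hYpos j hj N]
      simp [List.getD_eq_getElem?_getD, hj]
      split_ifs <;> omega
    rw [hmap]
    have htn : ((N % Y : Nat) : Int).toNat = N % Y := by omega
    have htd : (y - ((N % Y : Nat) : Int)).toNat = Y - N % Y := by omega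
    rw [htn, htd]
    have hsplit : Y = N % Y + (Y - N % Y) := by omega
    have hfin := range_map_ite (N % Y) (Y - N % Y) (((N / Y : Nat) : Int) + 1) ((N / Y : Nat) : Int)
    rw [← hsplit] at hfin
    exact hfin
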